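-- pv_equiv track=rewrite | github.com/Preshehi/DataStructuresPractice | CodeJam 2017/Fashion/fashion.py | stylepoints
-- ===== SOURCE A (Python) =====
-- def stylepoints(L):
-- 	n=0
-- 	for M in L:
-- 		for x in M:
-- 			if x=='+' or x=='x':
-- 				n=n+1
-- 			elif x=='o':
-- 				n=n+2
-- 	return n
-- ===== SOURCE B (Python) =====
-- def stylepoints(L):
--     # Stage 1: build a character histogram of the whole grid.
--     freq = {}
--     for M in L:
--         for x in M:
--             freq[x] = freq.get(x, 0) + 1
--     # Stage 2: read the answer off three histogram entries.
--     return freq.get('+', 0) + freq.get('x', 0) + 2 * freq.get('o', 0)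
-- ===== Notes on version B (the rewrite author's own statement) =====
-- stated objective: alternative
-- what changed: B first builds a character frequency dictionary over the whole grid (no branching, no weighting during traversal), then computes the result afterwards from three histogram lookups, whereas A accumulates a weighted counter with per-character branches in a single pass.
import Mathlib
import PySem

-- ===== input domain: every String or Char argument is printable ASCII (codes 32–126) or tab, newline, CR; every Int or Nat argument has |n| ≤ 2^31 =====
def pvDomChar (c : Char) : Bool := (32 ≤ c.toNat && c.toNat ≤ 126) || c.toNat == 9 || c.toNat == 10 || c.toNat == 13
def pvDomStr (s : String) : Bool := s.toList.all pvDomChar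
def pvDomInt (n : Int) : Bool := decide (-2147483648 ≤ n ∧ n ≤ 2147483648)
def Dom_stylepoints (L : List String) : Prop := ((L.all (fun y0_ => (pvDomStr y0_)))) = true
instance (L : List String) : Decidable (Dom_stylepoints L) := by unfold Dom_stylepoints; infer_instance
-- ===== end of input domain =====

-- B builds a character-frequency dictionary over the whole grid first, then reads the
-- answer off three histogram lookups; A accumulates a weighted counter with per-character branches.

-- ===== PORT A =====
def stylepoints (L : List String) : Int :=
  L.foldl (fun n M =>
    M.toList.foldl (fun n x =>
      if x == '+' || x == 'x' then n + 1
      else if x == 'o' then n + 2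
      else n) n) 0

-- ===== PORT B =====
def stylepoints_alt (L : List String) : Int :=
  let freq : PySem.Dict Char Int :=
    L.foldl (fun d M =>
      M.toList.foldl (fun d x => d.insert x (d.getD x 0 + 1)) d) PySem.Dict.empty
  freq.getD '+' 0 + freq.getD 'x' 0 + 2 * freq.getD 'o' 0

-- ===== PRECONDITION & SPEC =====
def Spec_stylepoints (L : List String) (out : Int) : Prop := out = stylepoints_alt L
instance (L : List String) (out : Int) : Decidable (Spec_stylepoints L out) := by unfold Spec_stylepoints; infer_instance

-- ===== CLAIM (what is proved, stated in full; the proofs are below) =====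
def Claim_equal_stylepoints : Prop := ∀ (L : List String), Dom_stylepoints L → Spec_stylepoints L (stylepoints L)

-- ===== LEMMAS AND PROOFS =====

-- A's inner per-character fold over a row adds the weighted character counts of the row
theorem row_fold (cs : List Char) : ∀ (n : Int),
    cs.foldl (fun n x =>
      if x == '+' || x == 'x' then n + 1
      else if x == 'o' then n + 2
      else n) n
    = n + ((cs.count '+' : Int) + (cs.count 'x' : Int) + 2 * (cs.count 'o' : Int)) := by
  induction cs with
  | nil => intro n; simp
  | cons x t ih =>
    intro n
    simp only [List.foldl_cons, List.count_cons]
    rw [ih]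
    by_cases h1 : x = '+'
    · subst h1; simp; ring
    · by_cases h2 : x = 'x'
      · subst h2; simp; ring
      · by_cases h3 : x = 'o'
        · subst h3; simp; ring
        · simp [h1, h2, h3]

-- A's outer fold equals the weighted character counts of the flattened grid
theorem a_fold (L : List String) : ∀ (n : Int),
    L.foldl (fun n M =>
      M.toList.foldl (fun n x =>
        if x == '+' || x == 'x' then n + 1
        else if x == 'o' then n + 2
        else n) n) n
    = n + (((L.flatMap String.toList).count '+' : Int)
         + ((L.flatMap String.toList).count 'x' : Int)
         + 2 * ((L.flatMap String.toList).count 'o' : Int)) := by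
  induction L with
  | nil => intro n; simp
  | cons M t ih =>
    intro n
    simp only [List.foldl_cons, List.flatMap_cons, List.count_append]
    rw [row_fold, ih]
    push_cast
    ring

-- B's histogram loop: each entry holds the character's count in the flattened grid
theorem freq_getD (v : Char) (L : List String) : ∀ (d : PySem.Dict Char Int),
    (L.foldl (fun d M =>
        M.toList.foldl (fun d x => d.insert x (d.getD x 0 + 1)) d) d).getD v 0
    = d.getD v 0 + ((L.flatMap String.toList).count v : Int) := by
  induction L with
  | nil => intro d; simp
  | cons M t ih =>
    intro d
    simp only [List.foldl_cons, List.flatMap_cons, List.count_append]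
    rw [ih, PySem.Dict.getD_foldl_insert_add_one]
    push_cast
    ring

-- ===== VERDICT (by name: the statement is the Claim_ definition above) =====
theorem stylepoints_spec : Claim_equal_stylepoints := by
  intro L _
  unfold Spec_stylepoints stylepoints stylepoints_alt
  simp only []
  rw [a_fold L 0, freq_getD '+' L PySem.Dict.empty, freq_getD 'x' L PySem.Dict.empty,
      freq_getD 'o' L PySem.Dict.empty]
  simp
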